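-- pv_equiv track=rewrite | github.com/alinojoumi8/trading-intel-mvp | backend/app/routers/multi_timeframe.py | _determine_consensus
-- ===== SOURCE A (Python) =====
-- from typing import List, Optional
--
-- def _determine_consensus(trends: List[str]) -> str:
--     """
--     Determine consensus from list of trend directions.
--     BULLISH if all TRENDING_UP, BEARISH if all TRENDING_DOWN, MIXED otherwise.
--     """
--     non_ranging = [t for t in trends if t != "RANGING"]
--     if not non_ranging:
--         return "MIXED"
--     if all(t == "TRENDING_UP" for t in non_ranging):
--         return "BULLISH"
--     if all(t == "TRENDING_DOWN" for t in non_ranging):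
--         return "BEARISH"
--     return "MIXED"
-- ===== SOURCE B (Python) =====
-- from typing import List, Optional
--
-- def _determine_consensus(trends: List[str]) -> str:
--     has_up = has_down = has_other = False
--     for t in trends:
--         if t == "RANGING":
--             continue
--         elif t == "TRENDING_UP":
--             has_up = True
--         elif t == "TRENDING_DOWN":
--             has_down = True
--         else:
--             has_other = True
--     if has_up and not has_down and not has_other:
--         return "BULLISH"
--     if has_down and not has_up and not has_other:
--         return "BEARISH"
--     return "MIXED"
-- ===== Notes on version B (the rewrite author's own statement) =====
-- stated objective: simpler
-- what changed: Replaced the filtered-list build plus two all() scans with a single pass maintaining three booleans (has_up/has_down/has_other) and a final table of the flags.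
import Mathlib
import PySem

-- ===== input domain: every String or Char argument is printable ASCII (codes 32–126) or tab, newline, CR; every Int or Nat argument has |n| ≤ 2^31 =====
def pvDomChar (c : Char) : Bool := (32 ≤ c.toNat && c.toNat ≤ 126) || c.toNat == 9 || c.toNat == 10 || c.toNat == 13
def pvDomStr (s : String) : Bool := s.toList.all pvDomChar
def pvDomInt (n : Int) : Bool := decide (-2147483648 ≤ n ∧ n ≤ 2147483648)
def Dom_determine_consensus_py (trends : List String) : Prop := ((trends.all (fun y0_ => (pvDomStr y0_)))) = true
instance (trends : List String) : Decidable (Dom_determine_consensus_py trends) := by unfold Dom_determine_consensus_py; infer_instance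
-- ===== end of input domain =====

-- B replaces A's filtered-list rebuild plus two all() scans by one pass keeping three booleans (simpler, same cost).

-- ===== PORT A =====
def determine_consensus_py (trends : List String) : String :=
  let non_ranging := trends.filter (fun t => t != "RANGING")
  if non_ranging.isEmpty then "MIXED"
  else if non_ranging.all (fun t => t == "TRENDING_UP") then "BULLISH"
  else if non_ranging.all (fun t => t == "TRENDING_DOWN") then "BEARISH"
  else "MIXED"

-- ===== PORT B =====
def altLoop (trends : List String) (hu hd ho : Bool) : Bool × Bool × Bool :=
  match trends with
  | [] => (hu, hd, ho)
  | t :: ts =>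
    if t == "RANGING" then altLoop ts hu hd ho
    else if t == "TRENDING_UP" then altLoop ts true hd ho
    else if t == "TRENDING_DOWN" then altLoop ts hu true ho
    else altLoop ts hu hd true

def determine_consensus_py_alt (trends : List String) : String :=
  let s := altLoop trends false false false
  if s.1 && !s.2.1 && !s.2.2 then "BULLISH"
  else if s.2.1 && !s.1 && !s.2.2 then "BEARISH"
  else "MIXED"

-- ===== PRECONDITION & SPEC =====
def Spec_determine_consensus_py (trends : List String) (out : String) : Prop := out = determine_consensus_py_alt trends
instance (trends : List String) (out : String) : Decidable (Spec_determine_consensus_py trends out) := by unfold Spec_determine_consensus_py; infer_instance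

-- ===== CLAIM (what is proved, stated in full; the proofs are below) =====
def Claim_equal_determine_consensus_py : Prop := ∀ (trends : List String), Dom_determine_consensus_py trends → Spec_determine_consensus_py trends (determine_consensus_py trends)

-- ===== LEMMAS AND PROOFS =====

def hasUp (ts : List String) : Bool := ts.any (fun t => t == "TRENDING_UP")
def hasDown (ts : List String) : Bool := ts.any (fun t => t == "TRENDING_DOWN")
def hasOther (ts : List String) : Bool :=
  ts.any (fun t => !(t == "RANGING") && !(t == "TRENDING_UP") && !(t == "TRENDING_DOWN"))

theorem altLoop_eq (ts : List String) (hu hd ho : Bool) :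
    altLoop ts hu hd ho = (hu || hasUp ts, hd || hasDown ts, ho || hasOther ts) := by
  induction ts generalizing hu hd ho with
  | nil => simp [altLoop, hasUp, hasDown, hasOther]
  | cons t ts ih =>
    by_cases h1 : t = "RANGING"
    · subst h1; simp [altLoop, ih, hasUp, hasDown, hasOther]
    · by_cases h2 : t = "TRENDING_UP"
      · subst h2; simp [altLoop, ih, hasUp, hasDown, hasOther]
      · by_cases h3 : t = "TRENDING_DOWN"
        · subst h3; simp [altLoop, ih, hasUp, hasDown, hasOther]
        · have e1 : (t == "RANGING") = false := by simp [h1]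
          have e2 : (t == "TRENDING_UP") = false := by simp [h2]
          have e3 : (t == "TRENDING_DOWN") = false := by simp [h3]
          simp [altLoop, ih, hasUp, hasDown, hasOther, e1, e2, e3]

theorem filter_isEmpty_eq (ts : List String) :
    (ts.filter (fun t => t != "RANGING")).isEmpty = (!hasUp ts && !hasDown ts && !hasOther ts) := by
  induction ts with
  | nil => simp [hasUp, hasDown, hasOther]
  | cons t ts ih =>
    by_cases h1 : t = "RANGING"
    · subst h1; simp [ih, hasUp, hasDown, hasOther]
    · by_cases h2 : t = "TRENDING_UP"
      · subst h2; simp [hasUp, hasDown, hasOther]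
      · by_cases h3 : t = "TRENDING_DOWN"
        · subst h3; simp [hasUp, hasDown, hasOther]
        · have e1 : (t == "RANGING") = false := by simp [h1]
          have e2 : (t == "TRENDING_UP") = false := by simp [h2]
          have e3 : (t == "TRENDING_DOWN") = false := by simp [h3]
          simp [hasUp, hasDown, hasOther, e1, e2, e3, h1]

theorem all_up_eq (ts : List String) :
    (ts.filter (fun t => t != "RANGING")).all (fun t => t == "TRENDING_UP")
      = (!hasDown ts && !hasOther ts) := by
  induction ts with
  | nil => simp [hasDown, hasOther]
  | cons t ts ih =>
    by_cases h1 : t = "RANGING"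
    · subst h1; simp [ih, hasDown, hasOther]
    · by_cases h2 : t = "TRENDING_UP"
      · subst h2; simp [ih, hasDown, hasOther]
      · by_cases h3 : t = "TRENDING_DOWN"
        · subst h3; simp [hasDown, hasOther]
        · have e1 : (t == "RANGING") = false := by simp [h1]
          have e2 : (t == "TRENDING_UP") = false := by simp [h2]
          have e3 : (t == "TRENDING_DOWN") = false := by simp [h3]
          simp [hasDown, hasOther, e1, e2, e3, h1]

theorem all_down_eq (ts : List String) :
    (ts.filter (fun t => t != "RANGING")).all (fun t => t == "TRENDING_DOWN")
      = (!hasUp ts && !hasOther ts) := by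
  induction ts with
  | nil => simp [hasUp, hasOther]
  | cons t ts ih =>
    by_cases h1 : t = "RANGING"
    · subst h1; simp [ih, hasUp, hasOther]
    · by_cases h2 : t = "TRENDING_UP"
      · subst h2; simp [hasUp, hasOther]
      · by_cases h3 : t = "TRENDING_DOWN"
        · subst h3; simp [ih, hasUp, hasOther]
        · have e1 : (t == "RANGING") = false := by simp [h1]
          have e2 : (t == "TRENDING_UP") = false := by simp [h2]
          have e3 : (t == "TRENDING_DOWN") = false := by simp [h3]
          simp [hasUp, hasOther, e1, e2, e3, h1]

-- ===== VERDICT (by name: the statement is the Claim_ definition above) =====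
theorem determine_consensus_py_spec : Claim_equal_determine_consensus_py := by
  intro ts _
  show determine_consensus_py ts = determine_consensus_py_alt ts
  simp only [determine_consensus_py, determine_consensus_py_alt, altLoop_eq,
    filter_isEmpty_eq, all_up_eq, all_down_eq]
  cases hasUp ts <;> cases hasDown ts <;> cases hasOther ts <;> simp
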